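-- pv_equiv track=rewrite | github.com/botjagwar/botjagwar | api/parsers/functions/verb_forms.py | parse_fi_verb_form_of
-- ===== SOURCE A (Python) =====
-- def parse_fi_verb_form_of(template_expression):
--     parts = template_expression.split('|')
--     voice = 'act'
--     person = number = tense = mood = None
--     count = 0
--     for part in parts:
--         count += 1
--         if part.startswith('pn='):
--             pn = part.split('=')[1]
--             if pn == '1s':
--                 person = '1'
--                 number = 's'
--             elif pn == '2s':
--                 person = '2'
--                 number = 's'
--             elif pn == '3s':
--                 person = '3'
--                 number = 's'
--             elif pn == '1p':
--                 person = '1'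
--                 number = 'p'
--             elif pn == '2p':
--                 person = '2'
--                 number = 'p'
--             elif pn == '3p':
--                 person = '3'
--                 number = 'p'
--             elif pn == 'pasv' or pn == 'pass':
--                 voice = 'pass'
--
--         if part.startswith('tm='):
--             tense_mood = part.split('=')[1]
--             if tense_mood == 'pres':
--                 mood = 'ind'
--                 tense = 'pres'
--             elif tense_mood == 'past':
--                 mood = 'ind'
--                 tense = 'past'
--             elif tense_mood == 'cond':
--                 mood = 'cond'
--                 tense = 'pres'
--             elif tense_mood == 'impr':
--                 mood = 'imp'
--                 tense = 'pres'
--             elif tense_mood == 'potn':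
--                 mood = 'pot'
--                 tense = 'pres'
--
--     lemma = parts[-1].replace('}', '')
--     if 'region=' in lemma:
--         lemma = parts[-2]
--
--     verb_form = (lemma, tense, mood, person, number, voice)
--     return verb_form
-- ===== SOURCE B (Python) =====
-- _PN = {'1s': ('1', 's'), '2s': ('2', 's'), '3s': ('3', 's'),
--        '1p': ('1', 'p'), '2p': ('2', 'p'), '3p': ('3', 'p')}
-- _TM = {'pres': ('ind', 'pres'), 'past': ('ind', 'past'), 'cond': ('cond', 'pres'),
--        'impr': ('imp', 'pres'), 'potn': ('pot', 'pres')}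
--
--
-- def _last_value(parts, prefix):
--     # value of the last field with this prefix, or None if absent
--     return next((p.split('=')[1] for p in reversed(parts) if p.startswith(prefix)), None)
--
--
-- def parse_fi_verb_form_of(template_expression):
--     parts = template_expression.split('|')
--     lemma = parts[-1].replace('}', '')
--     if 'region=' in lemma:
--         lemma = parts[-2]
--     pn = _last_value(parts, 'pn=')
--     tm = _last_value(parts, 'tm=')
--     person, number = _PN.get(pn, (None, None))
--     voice = 'pass' if pn in ('pasv', 'pass') else 'act'
--     mood, tense = _TM.get(tm, (None, None))
--     return (lemma, tense, mood, person, number, voice)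
-- ===== Notes on version B (the rewrite author's own statement) =====
-- stated objective: simpler
-- what changed: A makes one forward pass threading five mutating state variables through if/elif chains; B has no per-part state at all: it searches reversed(parts) for the last 'pn=' and last 'tm=' field (next over a generator) and resolves each value independently through a static table, keeping the lemma tail rule unchanged.
-- outside the precondition, e.g. on parse_fi_verb_form_of('region='): A raises IndexError, B raises IndexError
import Mathlib
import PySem

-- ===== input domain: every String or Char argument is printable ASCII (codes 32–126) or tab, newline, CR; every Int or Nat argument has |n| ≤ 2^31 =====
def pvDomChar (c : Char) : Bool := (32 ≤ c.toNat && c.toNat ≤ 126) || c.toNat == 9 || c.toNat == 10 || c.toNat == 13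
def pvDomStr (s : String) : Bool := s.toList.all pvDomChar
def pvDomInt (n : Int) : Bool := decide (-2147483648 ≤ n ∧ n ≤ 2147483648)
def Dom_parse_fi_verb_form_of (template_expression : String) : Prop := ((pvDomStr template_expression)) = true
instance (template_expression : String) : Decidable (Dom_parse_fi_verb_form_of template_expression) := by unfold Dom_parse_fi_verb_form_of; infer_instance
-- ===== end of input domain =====

-- B drops A's single mutating five-variable pass: it searches the parts back-to-front for the last
-- 'pn='/'tm=' field and resolves each value independently through a static table (objective: simpler).


-- ===== PORT A =====
-- part.split('=') ('=' is a nonempty separator, so split? always returns)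
def pySplitEq (part : String) : List String := (PySem.Str.split? part "=").getD []
-- xs[i]; used only where the Python index is provably in range (the .getD "" is a totalization guard)
def pyAt (xs : List String) (i : Int) : String := (PySem.List.pyGet? xs i).getD ""

-- one iteration of A's for-loop; state = (voice, person, number, tense, mood, count)
def stepA (st : String × Option String × Option String × Option String × Option String × Int)
    (part : String) : String × Option String × Option String × Option String × Option String × Int :=
  let voice := st.1; let person := st.2.1; let number := st.2.2.1
  let tense := st.2.2.2.1; let mood := st.2.2.2.2.1; let count := st.2.2.2.2.2
  let count := count + 1
  let (voice, person, number) :=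
    if PySem.Str.startswith part "pn=" then
      let pn := pyAt (pySplitEq part) 1
      if pn == "1s" then (voice, some "1", some "s")
      else if pn == "2s" then (voice, some "2", some "s")
      else if pn == "3s" then (voice, some "3", some "s")
      else if pn == "1p" then (voice, some "1", some "p")
      else if pn == "2p" then (voice, some "2", some "p")
      else if pn == "3p" then (voice, some "3", some "p")
      else if pn == "pasv" || pn == "pass" then ("pass", person, number)
      else (voice, person, number)
    else (voice, person, number)
  let (tense, mood) :=
    if PySem.Str.startswith part "tm=" then
      let tm := pyAt (pySplitEq part) 1
      if tm == "pres" then (some "pres", some "ind")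
      else if tm == "past" then (some "past", some "ind")
      else if tm == "cond" then (some "pres", some "cond")
      else if tm == "impr" then (some "pres", some "imp")
      else if tm == "potn" then (some "pres", some "pot")
      else (tense, mood)
    else (tense, mood)
  (voice, person, number, tense, mood, count)

def parse_fi_verb_form_of (template_expression : String) :
    Option String × Option String × Option String × Option String × Option String × String :=
  let parts := (PySem.Str.split? template_expression "|").getD []
  let st := parts.foldl stepA ("act", none, none, none, none, 0)
  let voice := st.1; let person := st.2.1; let number := st.2.2.1
  let tense := st.2.2.2.1; let mood := st.2.2.2.2.1
  let lemma_ := PySem.Str.replace (pyAt parts (-1)) "}" ""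
  let lemma_ := if PySem.Str.isIn "region=" lemma_ then pyAt parts (-2) else lemma_
  (some lemma_, tense, mood, person, number, voice)

-- ===== PORT B =====
def pnTable : PySem.Dict String (String × String) :=
  PySem.Dict.ofList [("1s", ("1", "s")), ("2s", ("2", "s")), ("3s", ("3", "s")),
                     ("1p", ("1", "p")), ("2p", ("2", "p")), ("3p", ("3", "p"))]
def tmTable : PySem.Dict String (String × String) :=
  PySem.Dict.ofList [("pres", ("ind", "pres")), ("past", ("ind", "past")), ("cond", ("cond", "pres")),
                     ("impr", ("imp", "pres")), ("potn", ("pot", "pres"))]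

-- _last_value: next((p.split('=')[1] for p in reversed(parts) if p.startswith(prefix)), None)
def lastValue (parts : List String) (pre : String) : Option String :=
  (parts.reverse.find? (fun p => PySem.Str.startswith p pre)).map
    (fun p => pyAt (pySplitEq p) 1)

def parse_fi_verb_form_of_alt (template_expression : String) :
    Option String × Option String × Option String × Option String × Option String × String :=
  let parts := (PySem.Str.split? template_expression "|").getD []
  let lemma_ := PySem.Str.replace (pyAt parts (-1)) "}" ""
  let lemma_ := if PySem.Str.isIn "region=" lemma_ then pyAt parts (-2) else lemma_
  let pn := lastValue parts "pn="
  let tm := lastValue parts "tm="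
  -- person, number = _PN.get(pn, (None, None))  (pn may be None, which is never a key)
  let pnum := match pn.bind pnTable.get? with
    | some pr => (some pr.1, some pr.2)
    | none => ((none : Option String), (none : Option String))
  let voice := if pn == some "pasv" || pn == some "pass" then "pass" else "act"
  -- mood, tense = _TM.get(tm, (None, None))
  let mdts := match tm.bind tmTable.get? with
    | some pr => (some pr.1, some pr.2)
    | none => ((none : Option String), (none : Option String))
  (some lemma_, mdts.2, mdts.1, pnum.1, pnum.2, voice)

-- ===== PRECONDITION & SPEC =====
-- Pre_ excludes (a) templates with several 'pn=' parts or several 'tm=' parts, where A accumulates the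
-- effects of all of them while B keeps only the last one (an accidental duplicate-key corner), and
-- (b) templates whose lemma tail contains 'region=' while the template has a single part, where A
-- raises IndexError reading parts[-2].
def Pre_parse_fi_verb_form_of (template_expression : String) : Prop :=
  ((PySem.Str.split? template_expression "|").getD []).countP
      (fun p => PySem.Str.startswith p "pn=") ≤ 1 ∧
  ((PySem.Str.split? template_expression "|").getD []).countP
      (fun p => PySem.Str.startswith p "tm=") ≤ 1 ∧
  (PySem.Str.isIn "region="
      (PySem.Str.replace (pyAt ((PySem.Str.split? template_expression "|").getD []) (-1)) "}" "") = true →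
    2 ≤ ((PySem.Str.split? template_expression "|").getD []).length)
instance (template_expression : String) : Decidable (Pre_parse_fi_verb_form_of template_expression) := by
  unfold Pre_parse_fi_verb_form_of; infer_instance

def pvWitness_parse_fi_verb_form_of : String := "fi-verb form of|pn=1s|tm=pres|syoda}}"

def Spec_parse_fi_verb_form_of (template_expression : String)
    (out : Option String × Option String × Option String × Option String × Option String × String) : Prop :=
  out = parse_fi_verb_form_of_alt template_expression
instance (template_expression : String)
    (out : Option String × Option String × Option String × Option String × Option String × String) :
    Decidable (Spec_parse_fi_verb_form_of template_expression out) := by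
  unfold Spec_parse_fi_verb_form_of; infer_instance

-- ===== CLAIM (what is proved, stated in full; the proofs are below) =====
def Claim_equal_parse_fi_verb_form_of : Prop := ∀ (template_expression : String), Dom_parse_fi_verb_form_of template_expression → Pre_parse_fi_verb_form_of template_expression → Spec_parse_fi_verb_form_of template_expression (parse_fi_verb_form_of template_expression)

-- ===== LEMMAS AND PROOFS =====

def projPn (st : String × Option String × Option String × Option String × Option String × Int) :
    Option String × Option String × String := (st.2.1, st.2.2.1, st.1)
def projTm (st : String × Option String × Option String × Option String × Option String × Int) :
    Option String × Option String := (st.2.2.2.2.1, st.2.2.2.1)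

-- B's resolution of the pn/tm value, as one function of the found value (definitionally what alt computes)
def pnResolve (pn : Option String) : Option String × Option String × String :=
  let pr := match pn.bind pnTable.get? with
    | some pr => (some pr.1, some pr.2)
    | none => ((none : Option String), (none : Option String))
  (pr.1, pr.2, if pn == some "pasv" || pn == some "pass" then "pass" else "act")
def tmResolve (tm : Option String) : Option String × Option String :=
  match tm.bind tmTable.get? with
  | some pr => (some pr.1, some pr.2)
  | none => ((none : Option String), (none : Option String))

theorem stepA_pn_skip (st : String × Option String × Option String × Option String × Option String × Int)
    (p : String) (h : PySem.Str.startswith p "pn=" = false) : projPn (stepA st p) = projPn st := by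
  obtain ⟨v, p1, n1, t1, m1, c⟩ := st
  simp only [stepA, h, Bool.false_eq_true, if_false, projPn]

theorem stepA_tm_skip (st : String × Option String × Option String × Option String × Option String × Int)
    (p : String) (h : PySem.Str.startswith p "tm=" = false) : projTm (stepA st p) = projTm st := by
  obtain ⟨v, p1, n1, t1, m1, c⟩ := st
  simp only [stepA, h, Bool.false_eq_true, if_false, projTm]

theorem foldA_pn_skip (l : List String)
    (st : String × Option String × Option String × Option String × Option String × Int)
    (h : ∀ p ∈ l, PySem.Str.startswith p "pn=" = false) :
    projPn (l.foldl stepA st) = projPn st := by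
  induction l generalizing st with
  | nil => rfl
  | cons p l ih =>
    rw [List.foldl_cons, ih _ (fun q hq => h q (List.mem_cons_of_mem _ hq)),
      stepA_pn_skip _ _ (h p List.mem_cons_self)]

theorem foldA_tm_skip (l : List String)
    (st : String × Option String × Option String × Option String × Option String × Int)
    (h : ∀ p ∈ l, PySem.Str.startswith p "tm=" = false) :
    projTm (l.foldl stepA st) = projTm st := by
  induction l generalizing st with
  | nil => rfl
  | cons p l ih =>
    rw [List.foldl_cons, ih _ (fun q hq => h q (List.mem_cons_of_mem _ hq)),
      stepA_tm_skip _ _ (h p List.mem_cons_self)]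

theorem not_tm_of_pn (p : String) (h : PySem.Str.startswith p "pn=" = true) :
    PySem.Str.startswith p "tm=" = false := by
  rw [PySem.Str.startswith_eq, PySem.Chars.startswith_iff] at h
  rw [PySem.Str.startswith_eq]
  by_contra hc
  rw [Bool.not_eq_false, PySem.Chars.startswith_iff] at hc
  obtain ⟨t1, ht1⟩ := h
  obtain ⟨t2, ht2⟩ := hc
  rw [← ht2] at ht1
  simp at ht1

theorem not_pn_of_tm (p : String) (h : PySem.Str.startswith p "tm=" = true) :
    PySem.Str.startswith p "pn=" = false := by
  rw [PySem.Str.startswith_eq, PySem.Chars.startswith_iff] at h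
  rw [PySem.Str.startswith_eq]
  by_contra hc
  rw [Bool.not_eq_false, PySem.Chars.startswith_iff] at hc
  obtain ⟨t1, ht1⟩ := h
  obtain ⟨t2, ht2⟩ := hc
  rw [← ht2] at ht1
  simp at ht1

-- A's pn if/elif chain on the default state computes exactly B's resolution of that value
theorem stepA_pn_hit (st : String × Option String × Option String × Option String × Option String × Int)
    (p : String) (h : PySem.Str.startswith p "pn=" = true)
    (hst : projPn st = (none, none, "act")) :
    projPn (stepA st p) = pnResolve (some (pyAt (pySplitEq p) 1)) := by
  obtain ⟨v, p1, n1, t1, m1, c⟩ := st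
  simp only [projPn, Prod.mk.injEq] at hst
  obtain ⟨hp1, hn1, hv⟩ := hst
  subst hp1; subst hn1; subst hv
  have htm := not_tm_of_pn p h
  simp only [stepA, h, if_true, htm, Bool.false_eq_true, if_false, projPn]
  generalize pyAt (pySplitEq p) 1 = pn
  rcases eq_or_ne pn "1s" with rfl | h1; · decide
  rcases eq_or_ne pn "2s" with rfl | h2; · decide
  rcases eq_or_ne pn "3s" with rfl | h3; · decide
  rcases eq_or_ne pn "1p" with rfl | h4; · decide
  rcases eq_or_ne pn "2p" with rfl | h5; · decide
  rcases eq_or_ne pn "3p" with rfl | h6; · decide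
  rcases eq_or_ne pn "pasv" with rfl | h7; · decide
  rcases eq_or_ne pn "pass" with rfl | h8; · decide
  have htab : pnTable = PySem.Dict.mk [("1s", ("1", "s")), ("2s", ("2", "s")), ("3s", ("3", "s")),
      ("1p", ("1", "p")), ("2p", ("2", "p")), ("3p", ("3", "p"))] := by rfl
  have e1 : (("1s" : String) == pn) = false := beq_eq_false_iff_ne.mpr (Ne.symm h1)
  have e2 : (("2s" : String) == pn) = false := beq_eq_false_iff_ne.mpr (Ne.symm h2)
  have e3 : (("3s" : String) == pn) = false := beq_eq_false_iff_ne.mpr (Ne.symm h3)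
  have e4 : (("1p" : String) == pn) = false := beq_eq_false_iff_ne.mpr (Ne.symm h4)
  have e5 : (("2p" : String) == pn) = false := beq_eq_false_iff_ne.mpr (Ne.symm h5)
  have e6 : (("3p" : String) == pn) = false := beq_eq_false_iff_ne.mpr (Ne.symm h6)
  simp [pnResolve, htab, PySem.Dict.get?, List.find?, e1, e2, e3, e4, e5, e6, h1, h2, h3, h4, h5, h6, h7, h8]

theorem stepA_tm_hit (st : String × Option String × Option String × Option String × Option String × Int)
    (p : String) (h : PySem.Str.startswith p "tm=" = true)
    (hst : projTm st = (none, none)) :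
    projTm (stepA st p) = tmResolve (some (pyAt (pySplitEq p) 1)) := by
  obtain ⟨v, p1, n1, t1, m1, c⟩ := st
  simp only [projTm, Prod.mk.injEq] at hst
  obtain ⟨hm1, ht1⟩ := hst
  subst hm1; subst ht1
  have hpn := not_pn_of_tm p h
  simp only [stepA, h, if_true, hpn, Bool.false_eq_true, if_false, projTm]
  generalize pyAt (pySplitEq p) 1 = tm
  rcases eq_or_ne tm "pres" with rfl | h1; · decide
  rcases eq_or_ne tm "past" with rfl | h2; · decide
  rcases eq_or_ne tm "cond" with rfl | h3; · decide
  rcases eq_or_ne tm "impr" with rfl | h4; · decide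
  rcases eq_or_ne tm "potn" with rfl | h5; · decide
  have htab : tmTable = PySem.Dict.mk [("pres", ("ind", "pres")), ("past", ("ind", "past")),
      ("cond", ("cond", "pres")), ("impr", ("imp", "pres")), ("potn", ("pot", "pres"))] := by rfl
  have e1 : (("pres" : String) == tm) = false := beq_eq_false_iff_ne.mpr (Ne.symm h1)
  have e2 : (("past" : String) == tm) = false := beq_eq_false_iff_ne.mpr (Ne.symm h2)
  have e3 : (("cond" : String) == tm) = false := beq_eq_false_iff_ne.mpr (Ne.symm h3)
  have e4 : (("impr" : String) == tm) = false := beq_eq_false_iff_ne.mpr (Ne.symm h4)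
  have e5 : (("potn" : String) == tm) = false := beq_eq_false_iff_ne.mpr (Ne.symm h5)
  simp [tmResolve, htab, PySem.Dict.get?, List.find?, e1, e2, e3, e4, e5, h1, h2, h3, h4, h5]

theorem lastValue_none (l : List String) (pre : String)
    (h : ∀ p ∈ l, PySem.Str.startswith p pre = false) : lastValue l pre = none := by
  unfold lastValue
  rw [List.find?_eq_none.mpr (by
    intro x hx; rw [List.mem_reverse] at hx
    have := h x hx; rw [PySem.Str.startswith_eq] at this; simp [this])]
  rfl

theorem lastValue_single (l1 l2 : List String) (p pre : String)
    (hp : PySem.Str.startswith p pre = true)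
    (h2 : ∀ x ∈ l2, PySem.Str.startswith x pre = false) :
    lastValue (l1 ++ p :: l2) pre = some (pyAt (pySplitEq p) 1) := by
  unfold lastValue
  rw [List.reverse_append, List.reverse_cons, List.append_assoc, List.find?_append,
    List.find?_eq_none.mpr (by
      intro x hx; rw [List.mem_reverse] at hx
      have := h2 x hx; rw [PySem.Str.startswith_eq] at this; simp [this])]
  have hp' := hp; rw [PySem.Str.startswith_eq] at hp'
  simp [hp']

theorem pn_thm (l : List String)
    (h : l.countP (fun p => PySem.Str.startswith p "pn=") ≤ 1) :
    projPn (l.foldl stepA ("act", none, none, none, none, 0)) =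
      pnResolve (lastValue l "pn=") := by
  rcases Nat.le_one_iff_eq_zero_or_eq_one.mp h with h0 | h1
  · have hall := List.countP_eq_zero.mp h0
    have hallf : ∀ p ∈ l, PySem.Str.startswith p "pn=" = false := by
      intro p hp; have := hall p hp; simpa using this
    rw [foldA_pn_skip l _ hallf, lastValue_none l _ hallf]
    rfl
  · rw [List.countP_eq_length_filter] at h1
    obtain ⟨p, hfil⟩ := List.length_eq_one_iff.mp h1
    obtain ⟨l1, l2, hl, hl1, hp, hl2⟩ := List.filter_eq_cons_iff.mp hfil
    have hl1f : ∀ x ∈ l1, PySem.Str.startswith x "pn=" = false := by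
      intro x hx; have := hl1 x hx; simpa using this
    have hl2f : ∀ x ∈ l2, PySem.Str.startswith x "pn=" = false := by
      intro x hx
      have := List.filter_eq_nil_iff.mp hl2 x hx; simpa using this
    subst hl
    rw [List.foldl_append, List.foldl_cons]
    rw [foldA_pn_skip l2 _ hl2f]
    rw [stepA_pn_hit _ p hp (foldA_pn_skip l1 _ hl1f)]
    rw [lastValue_single l1 l2 p _ hp hl2f]

theorem tm_thm (l : List String)
    (h : l.countP (fun p => PySem.Str.startswith p "tm=") ≤ 1) :
    projTm (l.foldl stepA ("act", none, none, none, none, 0)) =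
      tmResolve (lastValue l "tm=") := by
  rcases Nat.le_one_iff_eq_zero_or_eq_one.mp h with h0 | h1
  · have hall := List.countP_eq_zero.mp h0
    have hallf : ∀ p ∈ l, PySem.Str.startswith p "tm=" = false := by
      intro p hp; have := hall p hp; simpa using this
    rw [foldA_tm_skip l _ hallf, lastValue_none l _ hallf]
    rfl
  · rw [List.countP_eq_length_filter] at h1
    obtain ⟨p, hfil⟩ := List.length_eq_one_iff.mp h1
    obtain ⟨l1, l2, hl, hl1, hp, hl2⟩ := List.filter_eq_cons_iff.mp hfil
    have hl1f : ∀ x ∈ l1, PySem.Str.startswith x "tm=" = false := by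
      intro x hx; have := hl1 x hx; simpa using this
    have hl2f : ∀ x ∈ l2, PySem.Str.startswith x "tm=" = false := by
      intro x hx
      have := List.filter_eq_nil_iff.mp hl2 x hx; simpa using this
    subst hl
    rw [List.foldl_append, List.foldl_cons]
    rw [foldA_tm_skip l2 _ hl2f]
    rw [stepA_tm_hit _ p hp (foldA_tm_skip l1 _ hl1f)]
    rw [lastValue_single l1 l2 p _ hp hl2f]

theorem assemble (st : String × Option String × Option String × Option String × Option String × Int)
    (pnv : Option String) (tmv : Option String)
    (hpn : projPn st = pnResolve pnv) (htm : projTm st = tmResolve tmv) (lem : Option String) :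
    (lem, st.2.2.2.1, st.2.2.2.2.1, st.2.1, st.2.2.1, st.1) =
      (lem, (tmResolve tmv).2, (tmResolve tmv).1,
        (pnResolve pnv).1, (pnResolve pnv).2.1, (pnResolve pnv).2.2) := by
  rw [← hpn, ← htm]; rfl

-- ===== VERDICT (by name: the statement is the Claim_ definition above) =====
theorem parse_fi_verb_form_of_spec : Claim_equal_parse_fi_verb_form_of := by
  intro t _hdom hpre
  obtain ⟨h1, h2, _h3⟩ := hpre
  show parse_fi_verb_form_of t = parse_fi_verb_form_of_alt t
  unfold parse_fi_verb_form_of parse_fi_verb_form_of_alt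
  exact assemble _ _ _ (pn_thm _ h1) (tm_thm _ h2) _
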